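-- pv_equiv track=rewrite | github.com/cirosantilli/project-euler-solutions | solvers/986.py | extinct_for_k1
-- ===== SOURCE A (Python) =====
-- from typing import Dict, List, Tuple
--
-- def extinct_for_k1(n: int, k: int) -> bool:
--     """
--     Decide whether H(1, n) with initial h = k halts (eventual constant 0).
--     Uses a dedicated in-place cyclic kernel for c=1, d=n.
--     """
--     if k == 0:
--         return True
--
--     size = n + 1
--     last = size - 1
--     cells: List[int] = [0] * size
--     cells[last] = k
--     zero_count = last
--
--     while True:
--         for i in range(last):
--             old = cells[i]
--             nxt = (old + cells[i + 1]) >> 1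
--             cells[i] = nxt
--             if old:
--                 if not nxt:
--                     zero_count += 1
--             elif nxt:
--                 zero_count -= 1
--
--         old = cells[last]
--         nxt = (old + cells[0]) >> 1
--         cells[last] = nxt
--         if old:
--             if not nxt:
--                 zero_count += 1
--         elif nxt:
--             zero_count -= 1
--
--         # All-zero and all-positive states are forward-invariant.
--         if zero_count == size:
--             return True
--         if zero_count == 0:
--             return False
-- ===== SOURCE B (Python) =====
-- def extinct_for_k1(n: int, k: int) -> bool:
--     """
--     Decide whether H(1, n) with initial h = k halts (eventual constant 0).
--     Sparse rewrite: instead of a dense length-(n+1) array scanned in full every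
--     generation, keep only the nonzero cells in a dict {index: value}.  Each
--     generation visits just the neighbourhood of the current support (a cell can
--     be nonzero next step only if it or its right neighbour is nonzero now), and
--     halting is read off the dict itself: empty support = extinct, full support
--     (size n+1) = everywhere positive.
--     """
--     if k == 0:
--         return True
--
--     last = n
--     live = {last: k}  # invariant: exactly the cells with a nonzero value
--     while True:
--         new = {}
--         for j in live:
--             for i in (j - 1, j):
--                 if 0 <= i < last and i not in new:
--                     v = (live.get(i, 0) + live.get(i + 1, 0)) >> 1
--                     if v:
--                         new[i] = v
--         wrap = new.get(0, 0) if last else live.get(0, 0)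
--         v = (live.get(last, 0) + wrap) >> 1
--         if v:
--             new[last] = v
--         live = new
--         if not live:
--             return True
--         if len(live) == last + 1:
--             return False
-- ===== Notes on version B (the rewrite author's own statement) =====
-- stated objective: faster
-- what changed: Replaces A's dense length-(n+1) array with in-place mutation and an incrementally maintained zero_count by a sparse dict holding only the nonzero cells: each generation visits just the neighbourhood of the current support instead of scanning all n cells, and halting is decided by the dict being empty (extinct) or full (everywhere nonzero).
import Mathlib
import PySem

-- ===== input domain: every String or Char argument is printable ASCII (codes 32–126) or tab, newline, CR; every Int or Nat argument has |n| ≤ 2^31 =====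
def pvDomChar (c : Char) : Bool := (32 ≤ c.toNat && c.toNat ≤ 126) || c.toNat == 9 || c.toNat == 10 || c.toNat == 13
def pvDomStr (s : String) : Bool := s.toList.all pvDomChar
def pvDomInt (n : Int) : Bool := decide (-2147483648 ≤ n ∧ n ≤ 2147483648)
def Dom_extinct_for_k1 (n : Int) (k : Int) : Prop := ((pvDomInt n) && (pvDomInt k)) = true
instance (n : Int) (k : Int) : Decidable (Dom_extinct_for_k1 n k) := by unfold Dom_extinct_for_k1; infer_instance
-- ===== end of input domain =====

-- B replaces A's dense length-(n+1) array with in-place mutation and a running zero_count by a sparse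
-- dict holding only the nonzero cells, whose support drives both the per-generation work (Θ(support)
-- instead of Θ(n)) and the halting decision (empty dict / full dict); objective: faster (measured).
-- Both Pythons run an unbounded `while True`; each loop is ported step for step with a fuel parameter chosen far
-- above the simulation's iteration count on the admitted inputs (measured growth ≈ n²·log k; fuel = (n+2)²·2⁶²),
-- so the exhaustion branch is never reached there.

-- fuel for the `while True` loops of BOTH ports (port scaffolding, not part of either algorithm)
def pvFuel (n : Int) : Nat := (n.toNat + 2) ^ 2 * 2 ^ 62

-- ===== PORT A =====
-- Python `x >> 1` is Lean's `x >>> 1` on Int (arithmetic shift, exact on negatives).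
-- All list reads/writes are in range on Pre_-admitted inputs, so `getD _ 0` / `set` are exact there.

-- body of A's `for i in range(last)` over the state (cells, zero_count)
def pvA_body (st : List Int × Int) (i : Nat) : List Int × Int :=
  let old := st.1.getD i 0
  let nxt := (old + st.1.getD (i + 1) 0) >>> 1
  let cells := st.1.set i nxt
  let zc := if old ≠ 0 then (if nxt = 0 then st.2 + 1 else st.2)
            else (if nxt ≠ 0 then st.2 - 1 else st.2)
  (cells, zc)

-- one pass of A's while-body: the inner for-loop, then the wrap-around update of cells[last]
def pvA_iterFn (last : Nat) (cells0 : List Int) (zc0 : Int) : List Int × Int :=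
  let st := (List.range last).foldl pvA_body (cells0, zc0)
  let old := st.1.getD last 0
  let nxt := (old + st.1.getD 0 0) >>> 1
  (st.1.set last nxt,
   if old ≠ 0 then (if nxt = 0 then st.2 + 1 else st.2)
   else (if nxt ≠ 0 then st.2 - 1 else st.2))

-- A's `while True` loop
def pvA_loop : Nat → Nat → List Int → Int → Bool
  | 0, _, _, _ => false  -- fuel exhaustion, unreachable on admitted inputs
  | fuel + 1, last, cells0, zc0 =>
    let st := pvA_iterFn last cells0 zc0
    if st.2 = (last : Int) + 1 then true        -- zero_count == size
    else if st.2 = 0 then false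
    else pvA_loop fuel last st.1 st.2

def extinct_for_k1 (n : Int) (k : Int) : Bool :=
  if k = 0 then true
  else
    let size := n + 1
    let last := size - 1
    let cells := (List.replicate size.toNat 0).set last.toNat k
    pvA_loop (pvFuel n) last.toNat cells last

-- ===== PORT B =====
-- B keeps only the nonzero cells in a dict `live : index → value`.
-- body of B's `for i in (j-1, j): if 0 <= i < last and i not in new: …` for one candidate index i
def pvCand (last : Int) (live : PySem.Dict Int Int) (new : PySem.Dict Int Int) (i : Int) : PySem.Dict Int Int :=
  if 0 ≤ i ∧ i < last ∧ new.contains i = false then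
    let v := (live.getD i 0 + live.getD (i + 1) 0) >>> 1
    if v ≠ 0 then new.insert i v else new
  else new

-- one pass of B's while-body: candidates around the support, then the wrap-around cell `last`
def pvB_step (last : Int) (live : PySem.Dict Int Int) : PySem.Dict Int Int :=
  let new := live.keys.foldl (fun d j => pvCand last live (pvCand last live d (j - 1)) j) PySem.Dict.empty
  let wrap := if last ≠ 0 then new.getD 0 0 else live.getD 0 0  -- Python: `new.get(0, 0) if last else live.get(0, 0)`
  let v := (live.getD last 0 + wrap) >>> 1
  if v ≠ 0 then new.insert last v else new

-- B's `while True` loop: empty support = extinct, full support = everywhere nonzero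
def pvB_loop : Nat → Int → PySem.Dict Int Int → Bool
  | 0, _, _ => false  -- fuel exhaustion, unreachable on admitted inputs
  | fuel + 1, last, live =>
    let live' := pvB_step last live
    if live'.size = 0 then true                      -- not live
    else if (live'.size : Int) = last + 1 then false -- len(live) == last + 1
    else pvB_loop fuel last live'

def extinct_for_k1_alt (n : Int) (k : Int) : Bool :=
  if k = 0 then true
  else pvB_loop (pvFuel n) n (PySem.Dict.empty.insert n k)  -- live = {last: k}

-- ===== PRECONDITION & SPEC =====
-- A raises IndexError when k ≠ 0 and n < 0 (cells is empty, of negative requested size); only those inputs are excluded.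
def Pre_extinct_for_k1 (n : Int) (k : Int) : Prop := k = 0 ∨ 0 ≤ n
instance (n : Int) (k : Int) : Decidable (Pre_extinct_for_k1 n k) := by unfold Pre_extinct_for_k1; infer_instance

def pvWitness_extinct_for_k1 : Int × Int := (3, 5)

def Spec_extinct_for_k1 (n : Int) (k : Int) (out : Bool) : Prop := out = extinct_for_k1_alt n k
instance (n : Int) (k : Int) (out : Bool) : Decidable (Spec_extinct_for_k1 n k out) := by unfold Spec_extinct_for_k1; infer_instance

-- ===== CLAIM (what is proved, stated in full; the proofs are below) =====
def Claim_equal_extinct_for_k1 : Prop := ∀ (n : Int) (k : Int), Dom_extinct_for_k1 n k → Pre_extinct_for_k1 n k → Spec_extinct_for_k1 n k (extinct_for_k1 n k)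

-- ===== LEMMAS AND PROOFS =====

-- the dense next state both loops compute (proof-side ghost; neither port uses it)
def pvDense (n : Nat) (cells : List Int) : List Int :=
  let new := (List.range n).map (fun i => (cells.getD i 0 + cells.getD (i + 1) 0) >>> 1)
  let wrap := if n ≠ 0 then new.getD 0 0 else cells.getD 0 0
  new ++ [(cells.getD n 0 + wrap) >>> 1]

-- number of zero cells, as an Int (A's zero_count invariant)
def pvZ (l : List Int) : Int := (l.countP (fun c => c == 0) : Int)

lemma pvZ_append (l₁ l₂ : List Int) : pvZ (l₁ ++ l₂) = pvZ l₁ + pvZ l₂ := by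
  simp [pvZ, List.countP_append]

lemma pvZ_singleton (a : Int) : pvZ [a] = if a = 0 then 1 else 0 := by
  by_cases h : a = 0 <;> simp [pvZ, h]

-- the zero_count update in A's body is + Z(nxt) - Z(old)
lemma pvA_zc_update (old nxt zc : Int) :
    (if old ≠ 0 then (if nxt = 0 then zc + 1 else zc)
     else (if nxt ≠ 0 then zc - 1 else zc))
    = zc + (if nxt = 0 then 1 else 0) - (if old = 0 then 1 else 0) := by
  by_cases h1 : old = 0 <;> by_cases h2 : nxt = 0 <;> simp [h1, h2]

lemma getD_append_drop (pref cells : List Int) (m j : Nat) (hp : pref.length = m) :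
    (pref ++ cells.drop m).getD (m + j) 0 = cells.getD (m + j) 0 := by
  rw [List.getD_eq_getElem?_getD, List.getD_eq_getElem?_getD,
      List.getElem?_append_right (by omega), hp]
  simp [List.getElem?_drop]

-- A's inner for-loop, characterised: the first m cells are replaced by the new values,
-- zero_count is adjusted by the zeros gained minus the zeros lost.
lemma pvA_fold (cells : List Int) (zc : Int) (n : Nat) (hlen : cells.length = n + 1) :
    ∀ m, m ≤ n →
      (List.range m).foldl pvA_body (cells, zc)
      = ((List.range m).map (fun i => (cells.getD i 0 + cells.getD (i + 1) 0) >>> 1)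
           ++ cells.drop m,
         zc + pvZ ((List.range m).map (fun i => (cells.getD i 0 + cells.getD (i + 1) 0) >>> 1))
            - pvZ (cells.take m)) := by
  intro m
  induction m with
  | zero => simp [pvZ]
  | succ m ih =>
    intro hm
    have hm' : m ≤ n := by omega
    have hmc : m < cells.length := by omega
    have hmc1 : m + 1 < cells.length := by omega
    rw [List.range_succ, List.foldl_append, ih hm']
    simp only [List.foldl_cons, List.foldl_nil]
    set pref := (List.range m).map (fun i => (cells.getD i 0 + cells.getD (i + 1) 0) >>> 1) with hpref
    have hp : pref.length = m := by simp [hpref]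
    have hold : (pref ++ cells.drop m).getD m 0 = cells.getD m 0 := by
      simpa using getD_append_drop pref cells m 0 hp
    have hnext : (pref ++ cells.drop m).getD (m + 1) 0 = cells.getD (m + 1) 0 :=
      getD_append_drop pref cells m 1 hp
    have hset : (pref ++ cells.drop m).set m ((cells.getD m 0 + cells.getD (m + 1) 0) >>> 1)
        = (pref ++ [(cells.getD m 0 + cells.getD (m + 1) 0) >>> 1]) ++ cells.drop (m + 1) := by
      rw [List.set_append_right _ _ (by omega), hp, Nat.sub_self,
          List.drop_eq_getElem_cons hmc, List.set_cons_zero]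
      simp
    have hprefs : (List.range m ++ [m]).map (fun i => (cells.getD i 0 + cells.getD (i + 1) 0) >>> 1)
        = pref ++ [(cells.getD m 0 + cells.getD (m + 1) 0) >>> 1] := by
      rw [List.map_append, ← hpref]; rfl
    have htake : cells.take (m+1) = cells.take m ++ [cells.getD m 0] := by
      rw [List.take_succ]
      simp [List.getElem?_eq_getElem hmc, List.getD_eq_getElem?_getD]
    simp only [pvA_body]
    rw [hold, hnext, hset, hprefs, htake, pvZ_append, pvZ_append, pvZ_singleton, pvZ_singleton,
        pvA_zc_update, Prod.mk.injEq]
    exact ⟨by simp, by ring⟩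

lemma pvDense_length (n : Nat) (cells : List Int) :
    (pvDense n cells).length = n + 1 := by
  simp [pvDense]

-- one full pass of A's while-body computes the dense next state and keeps zero_count = pvZ
lemma pvA_iterFn_eq (n : Nat) (cells : List Int) (zc : Int) (hlen : cells.length = n + 1) :
    pvA_iterFn n cells zc = (pvDense n cells, zc + pvZ (pvDense n cells) - pvZ cells) := by
  have hdrop : cells.drop n = [cells.getD n 0] := by
    rw [List.drop_eq_getElem_cons (by omega), List.drop_eq_nil_of_le (by omega)]
    simp [List.getD_eq_getElem?_getD, List.getElem?_eq_getElem (show n < cells.length by omega)]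
  set pref := (List.range n).map (fun i => (cells.getD i 0 + cells.getD (i + 1) 0) >>> 1) with hpref
  have hp : pref.length = n := by simp [hpref]
  have hfold := pvA_fold cells zc n hlen n le_rfl
  rw [← hpref] at hfold
  have hold : (pref ++ cells.drop n).getD n 0 = cells.getD n 0 := by
    simpa using getD_append_drop pref cells n 0 hp
  have hwrap : (pref ++ cells.drop n).getD 0 0
      = (if n ≠ 0 then pref.getD 0 0 else cells.getD 0 0) := by
    by_cases hn : n = 0
    · subst hn
      simp only [hpref, List.range_zero, List.map_nil, List.nil_append, List.drop_zero]
      simp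
    · rw [List.getD_eq_getElem?_getD, List.getElem?_append_left (by omega)]
      simp [hn, List.getD_eq_getElem?_getD]
  have hset : ∀ v : Int, (pref ++ cells.drop n).set n v = pref ++ [v] := by
    intro v
    rw [hdrop, List.set_append_right _ _ (by omega), hp, Nat.sub_self, List.set_cons_zero]
  have hcells : cells = cells.take n ++ [cells.getD n 0] := by
    conv_lhs => rw [← List.take_append_drop n cells]
    rw [hdrop]
  rw [pvA_iterFn, hfold]
  simp only [hold, hwrap, hset, pvA_zc_update]
  rw [pvDense]
  simp only [← hpref]
  rw [Prod.mk.injEq]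
  constructor
  · rfl
  · have hcz : pvZ cells = pvZ (cells.take n) + (if cells.getD n 0 = 0 then 1 else 0) := by
      conv_lhs => rw [hcells]
      rw [pvZ_append, pvZ_singleton]
    rw [pvZ_append, pvZ_singleton, hcz]
    ring

-- getD of the dense next state, by position
lemma pvDense_getD_lt (n : Nat) (cells : List Int) (m : Nat) (hm : m < n) :
    (pvDense n cells).getD m 0 = (cells.getD m 0 + cells.getD (m + 1) 0) >>> 1 := by
  rw [pvDense, List.getD_eq_getElem?_getD, List.getElem?_append_left (by simp [hm])]
  simp [hm]

lemma pvDense_getD_last (n : Nat) (cells : List Int) :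
    (pvDense n cells).getD n 0
      = (cells.getD n 0 +
          (if n ≠ 0 then (cells.getD 0 0 + cells.getD 1 0) >>> 1 else cells.getD 0 0)) >>> 1 := by
  rw [pvDense]
  have h : ((List.range n).map (fun i => (cells.getD i 0 + cells.getD (i + 1) 0) >>> 1)).length = n := by simp
  rw [List.getD_eq_getElem?_getD, List.getElem?_append_right (by omega), h, Nat.sub_self]
  by_cases hn : n = 0
  · subst hn; simp
  · have h0 : 0 < n := by omega
    simp only [hn, if_false, ite_not, List.getElem?_cons_zero, Option.getD_some]
    have h2 : (List.map (fun i => (cells.getD i 0 + cells.getD (i + 1) 0) >>> 1)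
        (List.range n)).getD 0 0 = (cells.getD 0 0 + cells.getD 1 0) >>> 1 := by
      rw [List.getD_eq_getElem?_getD, List.getElem?_eq_getElem (by simpa using h0)]
      simp [h0]
    rw [h2]

-- the sparse/dense correspondence: live holds exactly the nonzero cells
def pvRel (n : Nat) (cells : List Int) (live : PySem.Dict Int Int) : Prop :=
  live.keys.Nodup ∧
  ∀ i : Int, live.get? i =
    if 0 ≤ i ∧ i ≤ (n : Int) ∧ cells.getD i.toNat 0 ≠ 0
    then some (cells.getD i.toNat 0) else none

lemma pvRel_getD (n : Nat) (cells : List Int) (live : PySem.Dict Int Int)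
    (h : pvRel n cells live) (i : Int) (h0 : 0 ≤ i) (h1 : i ≤ (n : Int)) :
    live.getD i 0 = cells.getD i.toNat 0 := by
  rw [PySem.Dict.getD_eq_get?_getD, h.2 i]
  by_cases hz : cells.getD i.toNat 0 ≠ 0
  · rw [if_pos ⟨h0, h1, hz⟩]; rfl
  · rw [if_neg (by tauto)]; simp at hz; simp [hz]

lemma pvCand_char (last : Int) (live d : PySem.Dict Int Int) (a : Int) (C : Int → Bool)
    (hnodup : d.keys.Nodup)
    (hd : ∀ i, d.get? i = if C i then
        some ((live.getD i 0 + live.getD (i + 1) 0) >>> 1) else none) :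
    (pvCand last live d a).keys.Nodup ∧
    ∀ i, (pvCand last live d a).get? i =
      if (C i || (decide (0 ≤ a) && decide (a < last)
                   && decide ((live.getD a 0 + live.getD (a + 1) 0) >>> 1 ≠ 0) && (i == a)))
      then some ((live.getD i 0 + live.getD (i + 1) 0) >>> 1) else none := by
  unfold pvCand
  by_cases hc : 0 ≤ a ∧ a < last ∧ d.contains a = false
  · rw [if_pos hc]
    have hCa : C a = false := by
      by_contra hCa
      have := hd a
      rw [if_pos (by simpa using hCa)] at this
      rw [(PySem.Dict.get?_eq_none_iff_contains d a).2 hc.2.2] at this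
      simp at this
    by_cases hv : (live.getD a 0 + live.getD (a + 1) 0) >>> 1 ≠ 0
    · rw [if_pos hv]
      refine ⟨PySem.Dict.nodup_keys_insert d a _ hnodup, fun i => ?_⟩
      rw [PySem.Dict.get?_insert]
      by_cases hia : i = a
      · subst hia
        simp [hc.1, hc.2.1, hv, hCa]
      · rw [if_neg hia, hd i]
        simp [hia]
    · rw [if_neg hv]
      refine ⟨hnodup, fun i => ?_⟩
      rw [hd i]
      simp only [hv]
      simp
  · rw [if_neg hc]
    refine ⟨hnodup, fun i => ?_⟩
    rw [hd i]
    by_cases h1 : 0 ≤ a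
    · by_cases h2 : a < last
      · -- then d.contains a = true, so C a = true (a already characterised)
        have hct : d.contains a = true := by
          rcases Bool.eq_false_or_eq_true (d.contains a) with h | h
          · exact h
          · exact absurd ⟨h1, h2, h⟩ hc
        have hCa : C a = true := by
          by_contra hCa
          have := hd a
          rw [if_neg (by simpa using hCa)] at this
          rw [PySem.Dict.get?_eq_none_iff_contains] at this
          rw [hct] at this
          simp at this
        by_cases hia : i = a
        · subst hia; simp [hCa]
        · simp [hia]
      · simp [h2]
    · simp [h1]

-- the candidate fold, characterised: it holds exactly the nonzero next values
-- whose index lies next to a processed key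
lemma pvFold_char (last : Int) (live : PySem.Dict Int Int) (l : List Int) :
    ∀ (d : PySem.Dict Int Int) (C : Int → Bool),
      d.keys.Nodup →
      (∀ i, d.get? i = if C i then
          some ((live.getD i 0 + live.getD (i + 1) 0) >>> 1) else none) →
      (l.foldl (fun d j => pvCand last live (pvCand last live d (j - 1)) j) d).keys.Nodup ∧
      ∀ i, (l.foldl (fun d j => pvCand last live (pvCand last live d (j - 1)) j) d).get? i =
        if (C i || (decide (0 ≤ i) && decide (i < last)
                     && decide ((live.getD i 0 + live.getD (i + 1) 0) >>> 1 ≠ 0)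
                     && l.any (fun j => i == j - 1 || i == j)))
        then some ((live.getD i 0 + live.getD (i + 1) 0) >>> 1) else none := by
  induction l with
  | nil =>
    intro d C hnd hd
    refine ⟨hnd, fun i => ?_⟩
    simp only [List.foldl_nil]
    rw [hd i]
    simp
  | cons j l ih =>
    intro d C hnd hd
    obtain ⟨hnd1, hd1⟩ := pvCand_char last live d (j - 1) C hnd hd
    obtain ⟨hnd2, hd2⟩ := pvCand_char last live (pvCand last live d (j - 1)) j _ hnd1 hd1
    obtain ⟨hnd3, hd3⟩ := ih (pvCand last live (pvCand last live d (j - 1)) j) _ hnd2 hd2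
    refine ⟨hnd3, fun i => ?_⟩
    rw [List.foldl_cons] at *
    rw [hd3 i]
    congr 1
    rw [Bool.eq_iff_iff]
    simp only [List.any_cons, Bool.or_eq_true, Bool.and_eq_true, decide_eq_true_eq, beq_iff_eq]
    rcases eq_or_ne i (j - 1) with h3 | h3
    · subst h3
      simp [show ¬ (j - 1 = j) from by omega]
      tauto
    · rcases eq_or_ne i j with h4 | h4
      · subst h4
        simp [h3]
        tauto
      · simp [h3, h4]

-- if the next value at 0 ≤ i < n is nonzero, some key of live lies at i or i+1
lemma pvCand_closure (n : Nat) (cells : List Int) (live : PySem.Dict Int Int)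
    (h : pvRel n cells live) (i : Int) (h0 : 0 ≤ i) (h1 : i < (n : Int))
    (hv : (live.getD i 0 + live.getD (i + 1) 0) >>> 1 ≠ 0) :
    live.keys.any (fun j => i == j - 1 || i == j) = true := by
  have hz : live.getD i 0 ≠ 0 ∨ live.getD (i + 1) 0 ≠ 0 := by
    by_contra hb
    push_neg at hb
    rw [hb.1, hb.2] at hv
    exact hv (by decide)
  rcases hz with hz | hz
  · have : live.get? i ≠ none := by
      rw [PySem.Dict.getD_eq_get?_getD] at hz
      intro hn; rw [hn] at hz; exact hz rfl
    rw [Ne, PySem.Dict.get?_eq_none_iff_not_mem_keys, not_not] at this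
    exact List.any_eq_true.2 ⟨i, this, by simp⟩
  · have : live.get? (i + 1) ≠ none := by
      rw [PySem.Dict.getD_eq_get?_getD] at hz
      intro hn; rw [hn] at hz; exact hz rfl
    rw [Ne, PySem.Dict.get?_eq_none_iff_not_mem_keys, not_not] at this
    exact List.any_eq_true.2 ⟨i + 1, this, by simp⟩

-- one pass of B preserves the sparse/dense correspondence with the dense next state
lemma pvB_step_rel (n : Nat) (cells : List Int) (live : PySem.Dict Int Int)
    (hlen : cells.length = n + 1) (h : pvRel n cells live) :
    pvRel n (pvDense n cells) (pvB_step (n : Int) live) := by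
  -- value agreement on the window
  have hget : ∀ i : Int, 0 ≤ i → i ≤ (n : Int) → live.getD i 0 = cells.getD i.toNat 0 :=
    fun i h0 h1 => pvRel_getD n cells live h i h0 h1
  -- characterise the candidate fold
  obtain ⟨hndN, hN0⟩ := pvFold_char (n : Int) live live.keys PySem.Dict.empty (fun _ => false)
    PySem.Dict.nodup_keys_empty (fun i => by simp [PySem.Dict.get?_empty])
  set N := live.keys.foldl (fun d j => pvCand (n : Int) live (pvCand (n : Int) live d (j - 1)) j)
      PySem.Dict.empty with hNdef
  -- N holds exactly the nonzero next values at 0 ≤ i < n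
  have hN : ∀ i : Int, N.get? i =
      if 0 ≤ i ∧ i < (n : Int) ∧ (live.getD i 0 + live.getD (i + 1) 0) >>> 1 ≠ 0
      then some ((live.getD i 0 + live.getD (i + 1) 0) >>> 1) else none := by
    intro i
    rw [hN0 i]
    by_cases hc : 0 ≤ i ∧ i < (n : Int) ∧ (live.getD i 0 + live.getD (i + 1) 0) >>> 1 ≠ 0
    · rw [if_pos hc]
      have hany := pvCand_closure n cells live h i hc.1 hc.2.1 hc.2.2
      rw [if_pos (by simp [hc.1, hc.2.1, hc.2.2, hany])]
    · rw [if_neg hc]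
      rw [if_neg ?_]
      simp only [Bool.false_or, Bool.and_eq_true, decide_eq_true_eq]
      tauto
  -- next values in N agree with the dense next state
  have hNd : ∀ i : Int, 0 ≤ i → i < (n : Int) →
      (live.getD i 0 + live.getD (i + 1) 0) >>> 1 = (pvDense n cells).getD i.toNat 0 := by
    intro i h0 h1
    have ht : i.toNat < n := by omega
    have ht1 : (i + 1).toNat = i.toNat + 1 := by omega
    rw [hget i h0 (by omega), hget (i + 1) (by omega) (by omega), ht1,
        pvDense_getD_lt n cells i.toNat ht]
  -- the wrap-around value equals the dense last value
  have hwrap : (if (n : Int) ≠ 0 then N.getD 0 0 else live.getD 0 0)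
      = (if n ≠ 0 then
          (cells.getD 0 0 + cells.getD 1 0) >>> 1 else cells.getD 0 0) := by
    by_cases hn : n = 0
    · subst hn
      rw [if_neg (by simp), if_neg (by simp), hget 0 le_rfl le_rfl]
      rfl
    · rw [if_pos (by simpa using hn), if_pos hn, PySem.Dict.getD_eq_get?_getD, hN 0]
      have e : (live.getD 0 0 + live.getD (0 + 1) 0) >>> 1
          = (cells.getD 0 0 + cells.getD 1 0) >>> 1 := by
        rw [hget 0 le_rfl (by omega), hget (0 + 1) (by omega) (by omega)]
        rfl
      by_cases hz : (live.getD 0 0 + live.getD (0 + 1) 0) >>> 1 ≠ 0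
      · rw [if_pos ⟨le_rfl, by omega, hz⟩, e]; rfl
      · rw [if_neg (by tauto)]
        simp only [Option.getD_none]
        rw [← e]
        exact (not_not.mp hz).symm
  -- the wrap value v equals the dense value at position n
  have hv : (live.getD (n : Int) 0 + (if (n : Int) ≠ 0 then N.getD 0 0 else live.getD 0 0)) >>> 1
      = (pvDense n cells).getD n 0 := by
    rw [hwrap, hget (n : Int) (by omega) le_rfl, pvDense_getD_last]
    simp
  -- assemble
  unfold pvB_step
  simp only [← hNdef, hv]
  constructor
  · by_cases hz : (pvDense n cells).getD n 0 ≠ 0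
    · rw [if_pos hz]; exact PySem.Dict.nodup_keys_insert _ _ _ hndN
    · rw [if_neg hz]; exact hndN
  · intro i
    have hgoal : ∀ d : PySem.Dict Int Int,
        (∀ j, d.get? j = if j = (n : Int) ∧ (pvDense n cells).getD n 0 ≠ 0
            then some ((pvDense n cells).getD n 0) else N.get? j) →
        d.get? i = if 0 ≤ i ∧ i ≤ (n : Int) ∧ (pvDense n cells).getD i.toNat 0 ≠ 0
          then some ((pvDense n cells).getD i.toNat 0) else none := by
      intro d hdpr
      rw [hdpr i]
      by_cases hin : i = (n : Int)
      · subst hin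
        have ht : ((n : Nat) : Int).toNat = n := by omega
        rw [ht]
        by_cases hz : (pvDense n cells).getD n 0 ≠ 0
        · rw [if_pos (show ((n : Nat) : Int) = ((n : Nat) : Int) ∧
                (pvDense n cells).getD n 0 ≠ 0 from ⟨rfl, hz⟩),
              if_pos (show (0 : Int) ≤ ((n : Nat) : Int) ∧ ((n : Nat) : Int) ≤ ((n : Nat) : Int) ∧
                (pvDense n cells).getD n 0 ≠ 0 from ⟨by omega, le_rfl, hz⟩)]
        · rw [if_neg (show ¬(((n : Nat) : Int) = ((n : Nat) : Int) ∧
                (pvDense n cells).getD n 0 ≠ 0) from fun hc => hz hc.2),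
              if_neg (show ¬((0 : Int) ≤ ((n : Nat) : Int) ∧ ((n : Nat) : Int) ≤ ((n : Nat) : Int) ∧
                (pvDense n cells).getD n 0 ≠ 0) from fun hc => hz hc.2.2),
              hN]
          rw [if_neg (by intro hc; exact absurd hc.2.1 (by omega))]
      · rw [if_neg (fun hc => hin hc.1), hN i]
        by_cases hr : 0 ≤ i ∧ i < (n : Int)
        · by_cases hz : (live.getD i 0 + live.getD (i + 1) 0) >>> 1 ≠ 0
          · rw [if_pos ⟨hr.1, hr.2, hz⟩,
                if_pos (show 0 ≤ i ∧ i ≤ ((n : Nat) : Int) ∧ (pvDense n cells).getD i.toNat 0 ≠ 0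
                  from ⟨hr.1, by omega, by rw [← hNd i hr.1 hr.2]; exact hz⟩),
                hNd i hr.1 hr.2]
          · rw [if_neg (by tauto),
                if_neg (by intro hc; exact hz (by rw [hNd i hr.1 hr.2]; exact hc.2.2))]
        · by_cases h0 : 0 ≤ i
          · have hgt : (n : Int) < i := by
              rcases lt_or_ge i (n : Int) with hlt | hge
              · exact absurd ⟨h0, hlt⟩ hr
              · omega
            rw [if_neg (fun hc => absurd hc.2.1 (by omega)),
                if_neg (fun hc => absurd hc.2.1 (by omega))]
          · rw [if_neg (fun hc => h0 hc.1), if_neg (fun hc => h0 hc.1)]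
    by_cases hz : (pvDense n cells).getD n 0 ≠ 0
    · rw [if_pos hz]
      exact hgoal _ (fun j => by
        rw [PySem.Dict.get?_insert]
        by_cases hj : j = ((n : Nat) : Int)
        · rw [if_pos hj, if_pos ⟨hj, hz⟩]
        · rw [if_neg hj, if_neg (fun hc => hj hc.1)])
    · rw [if_neg hz]
      exact hgoal _ (fun j => by
        by_cases hj : j = (n : Int) ∧ (pvDense n cells).getD n 0 ≠ 0
        · exact absurd hj.2 hz
        · rw [if_neg hj])

-- counting a predicate over the cells equals counting it over the index range
lemma countP_eq_range (cells : List Int) (p : Int → Bool) :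
    cells.countP p = (List.range cells.length).countP (fun m => p (cells.getD m 0)) := by
  induction cells using List.reverseRecOn with
  | nil => simp
  | append_singleton xs x ih =>
    rw [List.countP_append, List.length_append, List.length_singleton, List.range_succ,
        List.countP_append, ih]
    congr 1
    · exact List.countP_congr (fun m hm => by
        rw [List.mem_range] at hm
        simp only [List.getD_eq_getElem?_getD]
        rw [List.getElem?_append_left hm])
    · simp [List.getD_eq_getElem?_getD]

-- the dict size is the number of nonzero cells
lemma pvRel_size (n : Nat) (cells : List Int) (live : PySem.Dict Int Int)
    (hlen : cells.length = n + 1) (h : pvRel n cells live) :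
    (live.size : Int) = ((n : Int) + 1) - pvZ cells := by
  have hsz : live.size = live.keys.length := by
    simp [PySem.Dict.size, PySem.Dict.keys]
  set p : Nat → Bool := fun m => !(cells.getD m 0 == 0) with hp
  have hmem : ∀ a : Int, a ∈ live.keys ↔
      a ∈ ((List.range (n + 1)).filter p).map (fun (m : Nat) => (m : Int)) := by
    intro a
    constructor
    · intro ha
      have hk : live.get? a ≠ none := by
        rw [Ne, PySem.Dict.get?_eq_none_iff_not_mem_keys]
        exact fun hc => hc ha
      rw [h.2 a] at hk
      by_cases hc : 0 ≤ a ∧ a ≤ (n : Int) ∧ cells.getD a.toNat 0 ≠ 0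
      · have hmf : a.toNat ∈ (List.range (n + 1)).filter p := by
          refine List.mem_filter.2 ⟨List.mem_range.2 (by omega), ?_⟩
          rw [hp]
          simpa using hc.2.2
        have hcast : a = ((a.toNat : Nat) : Int) := by omega
        rw [hcast]
        exact List.mem_map_of_mem hmf
      · rw [if_neg hc] at hk
        exact absurd rfl hk
    · intro ha
      obtain ⟨m, hm, rfl⟩ := List.mem_map.1 ha
      rw [List.mem_filter] at hm
      have hm1 := List.mem_range.1 hm.1
      have hm2 : cells.getD m 0 ≠ 0 := by
        have := hm.2
        rw [hp] at this
        simpa using this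
      have hsome : live.get? (m : Int) = some (cells.getD ((m : Int)).toNat 0) := by
        rw [h.2]
        rw [if_pos ⟨by omega, by omega, by simpa using hm2⟩]
      by_contra hne
      have h0 := (PySem.Dict.get?_eq_none_iff_not_mem_keys live (m : Int)).2 hne
      rw [h0] at hsome
      simp at hsome
  have hnd2 : (((List.range (n + 1)).filter p).map (fun (m : Nat) => (m : Int))).Nodup := by
    refine List.Nodup.map ?_ (List.Nodup.filter _ List.nodup_range)
    intro a b hab
    simpa using hab
  have hperm := (List.perm_ext_iff_of_nodup h.1 hnd2).2 hmem
  have hlen2 := hperm.length_eq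
  rw [List.length_map, ← List.countP_eq_length_filter] at hlen2
  have htot := List.length_eq_countP_add_countP (l := List.range (n + 1)) p
  rw [List.length_range] at htot
  have hz : pvZ cells = (((List.range (n + 1)).countP (fun m => decide ¬p m = true)) : Int) := by
    rw [pvZ, countP_eq_range cells (fun c => c == 0), hlen]
    congr 1
    refine List.countP_congr (fun m _ => ?_)
    rw [hp]
    by_cases hc : cells.getD m 0 = 0 <;> simp [hc]
  rw [hsz]
  omega

lemma pvZ_le_length (l : List Int) : pvZ l ≤ (l.length : Int) := by
  have := List.countP_le_length (p := fun c : Int => c == 0) (l := l)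
  rw [pvZ]
  exact_mod_cast this

lemma pvZ_nonneg (l : List Int) : 0 ≤ pvZ l := by
  rw [pvZ]; positivity

-- the two loops agree whenever zero_count is the true zero count and live the true support
lemma pv_loops_eq (fuel : Nat) : ∀ (n : Nat) (cells : List Int) (live : PySem.Dict Int Int),
    cells.length = n + 1 → pvRel n cells live →
    pvA_loop fuel n cells (pvZ cells) = pvB_loop fuel (n : Int) live := by
  induction fuel with
  | zero => intro n cells live _ _; rfl
  | succ fuel ih =>
    intro n cells live hlen hrel
    have hlen' : (pvDense n cells).length = n + 1 := pvDense_length n cells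
    have hrel' := pvB_step_rel n cells live hlen hrel
    have hsz := pvRel_size n (pvDense n cells) (pvB_step (n : Int) live) hlen' hrel'
    rw [pvA_loop, pvB_loop]
    simp only [pvA_iterFn_eq n cells (pvZ cells) hlen]
    have hzs : pvZ cells + pvZ (pvDense n cells) - pvZ cells = pvZ (pvDense n cells) := by ring
    rw [hzs]
    have hb0 := pvZ_nonneg (pvDense n cells)
    have hb1 := pvZ_le_length (pvDense n cells)
    rw [hlen'] at hb1
    have h1 : (pvZ (pvDense n cells) = (n : Int) + 1) ↔ ((pvB_step (n : Int) live).size = 0) := by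
      constructor
      · intro h; omega
      · intro h; rw [h] at hsz; simp at hsz; omega
    have h2 : (pvZ (pvDense n cells) = 0) ↔
        (((pvB_step (n : Int) live).size : Int) = (n : Int) + 1) := by
      omega
    by_cases c1 : pvZ (pvDense n cells) = (n : Int) + 1
    · rw [if_pos c1, if_pos (h1.1 c1)]
    · rw [if_neg c1, if_neg (fun hc => c1 (h1.2 hc))]
      by_cases c2 : pvZ (pvDense n cells) = 0
      · rw [if_pos c2, if_pos (h2.1 c2)]
      · rw [if_neg c2, if_neg (fun hc => c2 (h2.2 hc))]
        exact ih n (pvDense n cells) (pvB_step (n : Int) live) hlen' hrel'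

lemma pv_init_cells (m : Nat) (k : Int) :
    (List.replicate (m + 1) (0 : Int)).set m k = List.replicate m (0 : Int) ++ [k] := by
  induction m with
  | zero => simp
  | succ m ih =>
    rw [List.replicate_succ, List.set_cons_succ, ih]
    simp [List.replicate_succ]

lemma pvZ_init (m : Nat) (k : Int) (hk : k ≠ 0) :
    pvZ (List.replicate m (0 : Int) ++ [k]) = (m : Int) := by
  rw [pvZ_append, pvZ_singleton]
  simp [pvZ, hk, List.countP_replicate]

lemma pv_init_getD (m : Nat) (k : Int) (j : Nat) :
    (List.replicate m (0 : Int) ++ [k]).getD j 0 =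
      if j = m then k else 0 := by
  by_cases hj : j = m
  · subst hj
    rw [List.getD_eq_getElem?_getD, List.getElem?_append_right (by simp), List.length_replicate]
    simp
  · by_cases hlt : j < m
    · rw [List.getD_eq_getElem?_getD, List.getElem?_append_left (by simpa using hlt)]
      simp [hlt, hj]
    · rw [if_neg hj]
      exact List.getD_eq_default _ _ (by simp; omega)

-- the initial sparse state {n: k} corresponds to the initial dense state
lemma pv_init_rel (m : Nat) (k : Int) (hk : k ≠ 0) :
    pvRel m (List.replicate m (0 : Int) ++ [k]) (PySem.Dict.empty.insert (m : Int) k) := by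
  constructor
  · exact PySem.Dict.nodup_keys_insert _ _ _ PySem.Dict.nodup_keys_empty
  · intro i
    rw [PySem.Dict.get?_insert]
    by_cases hi : i = (m : Int)
    · subst hi
      rw [if_pos rfl, if_pos ⟨by omega, le_rfl, by rw [pv_init_getD]; simp [hk]⟩, pv_init_getD]
      simp
    · rw [if_neg hi, PySem.Dict.get?_empty, if_neg ?_]
      intro hc
      have : i.toNat = m := by
        have := hc.2.2
        rw [pv_init_getD] at this
        by_contra hne
        rw [if_neg hne] at this
        exact this rfl
      omega

-- ===== VERDICT (by name: the statement is the Claim_ definition above) =====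
theorem extinct_for_k1_spec : Claim_equal_extinct_for_k1 := by
  intro n k _ hpre
  unfold Spec_extinct_for_k1 extinct_for_k1 extinct_for_k1_alt
  by_cases hk : k = 0
  · simp [hk]
  · have hn : 0 ≤ n := hpre.resolve_left hk
    have h1 : (n + 1).toNat = n.toNat + 1 := by omega
    have h2 : n + 1 - 1 = n := by ring
    simp only [hk, if_false, h1, h2]
    rw [pv_init_cells n.toNat k]
    have hzc : n = pvZ (List.replicate n.toNat (0 : Int) ++ [k]) := by
      rw [pvZ_init n.toNat k hk, Int.toNat_of_nonneg hn]
    have hloops := pv_loops_eq (pvFuel n) n.toNat (List.replicate n.toNat (0 : Int) ++ [k])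
      (PySem.Dict.empty.insert ((n.toNat : Nat) : Int) k) (by simp) (pv_init_rel n.toNat k hk)
    rw [← hzc] at hloops
    have hcast : ((n.toNat : Nat) : Int) = n := Int.toNat_of_nonneg hn
    rw [hcast] at hloops
    exact hloops
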